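-- pv_equiv track=rewrite | github.com/victorvic54/leetcode | 1975_maximum_matrix_sum.py | maxMatrixSum
-- ===== SOURCE A (Python) =====
-- from typing import List
--
-- def maxMatrixSum(matrix: List[List[int]]) -> int:
--     min_val = float('inf')
--     num_neg_sign = 0
--     total_sum = 0
--     for i in range(len(matrix)):
--         for j in range(len(matrix[i])):
--             if matrix[i][j] < 0:
--                 num_neg_sign += 1
--             min_val = min(min_val, abs(matrix[i][j]))
--             total_sum += abs(matrix[i][j])
--
--     if num_neg_sign % 2 == 0:
--         return total_sum
--
--     return total_sum - 2 * min_val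
-- ===== SOURCE B (Python) =====
-- from typing import List
--
-- def maxMatrixSum(matrix: List[List[int]]) -> int:
--     # DP over flip parity: since flipping signs of adjacent pairs lets us negate
--     # any even-sized subset of entries, track the best achievable sum using an
--     # even (e) / odd (o) number of negations so far; o is None before any entry.
--     e, o = 0, None
--     for row in matrix:
--         for x in row:
--             if o is None:
--                 e, o = e + x, e - x
--             else:
--                 e, o = max(e + x, o - x), max(o + x, e - x)
--     return e
-- ===== Notes on version B (the rewrite author's own statement) =====
-- stated objective: alternative
-- what changed: Replaces A's closed-form greedy (sum of absolute values, negative-count parity, minimum absolute value) by a dynamic program that scans the entries once carrying the best achievable sums with an even and with an odd number of sign negations and returns the even-parity optimum; no min/abs/parity bookkeeping at all.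
import Mathlib
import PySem

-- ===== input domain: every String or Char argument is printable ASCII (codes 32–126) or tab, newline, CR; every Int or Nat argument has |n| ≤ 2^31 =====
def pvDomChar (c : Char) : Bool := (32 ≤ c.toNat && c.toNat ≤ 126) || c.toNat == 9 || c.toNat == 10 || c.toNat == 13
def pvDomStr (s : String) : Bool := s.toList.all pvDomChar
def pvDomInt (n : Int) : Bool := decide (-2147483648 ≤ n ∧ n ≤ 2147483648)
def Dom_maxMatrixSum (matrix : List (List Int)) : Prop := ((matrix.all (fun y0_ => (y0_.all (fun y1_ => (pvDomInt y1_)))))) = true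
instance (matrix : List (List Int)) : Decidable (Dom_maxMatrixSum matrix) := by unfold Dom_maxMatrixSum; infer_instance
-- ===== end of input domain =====

-- B replaces A's greedy (sum of abs, negative-count parity, min abs) by a parity dynamic
-- program over the entries; equal return value proved, no speed claim.

-- ===== PORT A =====
-- A's loop body: update num_neg_sign, min_val (float('inf') start modelled as `none`), total_sum.
def pvStepA (st : Option Int × Int × Int) (x : Int) : Option Int × Int × Int :=
  let neg := if x < 0 then st.2.1 + 1 else st.2.1
  let mv : Option Int := some (match st.1 with | none => |x| | some m => min m |x|)
  (mv, neg, st.2.2 + |x|)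

def maxMatrixSum (matrix : List (List Int)) : Int :=
  let st := (PySem.List.pyRange 0 (matrix.length : Int) 1).foldl
      (fun st i =>
        let row := PySem.List.pyGetD matrix i []
        (PySem.List.pyRange 0 (row.length : Int) 1).foldl
          (fun st j => pvStepA st (PySem.List.pyGetD row j 0)) st)
      ((none : Option Int), (0 : Int), (0 : Int))
  if PySem.Int.mod st.2.1 2 = 0 then st.2.2
  else st.2.2 - 2 * st.1.getD 0   -- min_val is `some _` whenever num_neg_sign is odd

-- ===== PORT B =====
-- B's loop body: (e, o) = best sums with an even / odd number of negations; o is None at start.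
def pvStepB (st : Int × Option Int) (x : Int) : Int × Option Int :=
  match st.2 with
  | none => (st.1 + x, some (st.1 - x))
  | some o => (max (st.1 + x) (o - x), some (max (o + x) (st.1 - x)))

def maxMatrixSum_alt (matrix : List (List Int)) : Int :=
  (matrix.foldl (fun st row => row.foldl pvStepB st) ((0 : Int), (none : Option Int))).1

-- ===== PRECONDITION & SPEC =====
def Spec_maxMatrixSum (matrix : List (List Int)) (out : Int) : Prop := out = maxMatrixSum_alt matrix
instance (matrix : List (List Int)) (out : Int) : Decidable (Spec_maxMatrixSum matrix out) := by unfold Spec_maxMatrixSum; infer_instance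

-- ===== CLAIM (what is proved, stated in full; the proofs are below) =====
def Claim_equal_maxMatrixSum : Prop := ∀ (matrix : List (List Int)), Dom_maxMatrixSum matrix → Spec_maxMatrixSum matrix (maxMatrixSum matrix)

-- ===== LEMMAS AND PROOFS =====

-- running minimum of A, isolated
def pvGmin (m : Option Int) (x : Int) : Option Int :=
  some (match m with | none => |x| | some v => min v |x|)

lemma pvFoldA (l : List Int) : ∀ mv neg tot,
    l.foldl pvStepA (mv, neg, tot) =
      (l.foldl pvGmin mv,
       neg + (l.countP (fun x => decide (x < 0)) : Int),
       tot + (l.map (fun x => |x|)).sum) := by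
  induction l with
  | nil => simp
  | cons x t ih =>
      intro mv neg tot
      simp only [List.foldl_cons, ih, List.countP_cons, List.map_cons, List.sum_cons]
      unfold pvStepA pvGmin
      by_cases hx : x < 0
      · simp [hx, add_assoc, add_comm]
      · simp [hx, add_assoc]

-- the DP invariant: after a nonempty prefix, (e, o) are A's closed-form values
lemma pvFoldB (l : List Int) (hl : l ≠ []) :
    ∃ m : Int, l.foldl pvGmin none = some m ∧ 0 ≤ m ∧
      l.foldl pvStepB ((0 : Int), (none : Option Int)) =
        ((if l.countP (fun x => decide (x < 0)) % 2 = 0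
            then (l.map (fun x => |x|)).sum else (l.map (fun x => |x|)).sum - 2 * m),
         some (if l.countP (fun x => decide (x < 0)) % 2 = 0
            then (l.map (fun x => |x|)).sum - 2 * m else (l.map (fun x => |x|)).sum)) := by
  induction l using List.reverseRecOn with
  | nil => exact absurd rfl hl
  | append_singleton l x ih =>
      cases l with
      | nil =>
          refine ⟨|x|, by simp [pvGmin], abs_nonneg x, ?_⟩
          rcases lt_or_ge x 0 with hx | hx
          · simp [pvStepB, hx, abs_of_neg hx]; omega
          · simp [pvStepB, not_lt.mpr hx, abs_of_nonneg hx]; omega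
      | cons y t =>
          obtain ⟨m, hM, hm, hB⟩ := ih (by simp)
          refine ⟨min m |x|, ?_, le_min hm (abs_nonneg x), ?_⟩
          · rw [List.foldl_append, hM]; simp [pvGmin]
          · rw [List.foldl_append, hB]
            simp only [List.foldl_cons, List.foldl_nil, List.cons_append,
              List.countP_cons, List.countP_append, List.map_cons, List.map_append,
              List.sum_cons, List.sum_append, List.countP_nil, List.map_nil, List.sum_nil]
            have hax := abs_nonneg x
            rcases lt_or_ge x 0 with hx | hx
            · have hxa : |x| = -x := abs_of_neg hx
              simp [pvStepB, hx, hxa, Prod.ext_iff]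
              split_ifs <;> constructor <;> omega
            · have hxa : |x| = x := abs_of_nonneg hx
              simp [pvStepB, not_lt.mpr hx, hxa, Prod.ext_iff]
              split_ifs <;> constructor <;> omega

-- ===== VERDICT (by name: the statement is the Claim_ definition above) =====
theorem maxMatrixSum_spec : Claim_equal_maxMatrixSum := by
  intro matrix _
  show maxMatrixSum matrix = maxMatrixSum_alt matrix
  simp only [maxMatrixSum, maxMatrixSum_alt]
  have hrows : (PySem.List.pyRange 0 (matrix.length : Int) 1).foldl
      (fun st i =>
        (PySem.List.pyRange 0 ((PySem.List.pyGetD matrix i []).length : Int) 1).foldl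
          (fun st j => pvStepA st (PySem.List.pyGetD (PySem.List.pyGetD matrix i []) j 0)) st)
      ((none : Option Int), (0 : Int), (0 : Int))
      = matrix.flatten.foldl pvStepA ((none : Option Int), (0 : Int), (0 : Int)) := by
    rw [PySem.List.foldl_pyRange_zero_pyGetD' matrix []
        (fun st row => (PySem.List.pyRange 0 (row.length : Int) 1).foldl
          (fun st j => pvStepA st (PySem.List.pyGetD row j 0)) st)
        ((none : Option Int), (0 : Int), (0 : Int)),
      List.foldl_flatten]
    apply List.foldl_ext
    intro st row hrow
    exact PySem.List.foldl_pyRange_zero_pyGetD' row 0 pvStepA st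
  have hB : matrix.foldl (fun st row => row.foldl pvStepB st) ((0 : Int), (none : Option Int))
      = matrix.flatten.foldl pvStepB ((0 : Int), (none : Option Int)) := by
    rw [List.foldl_flatten]
  rw [hrows, hB, pvFoldA]
  cases hfl : matrix.flatten with
  | nil => simp [PySem.Int.mod]
  | cons y t =>
      obtain ⟨m, hM, hm, hDP⟩ := pvFoldB (y :: t) (by simp)
      rw [hDP, hM]
      by_cases hp : ((y :: t).countP (fun x => decide (x < 0))) % 2 = 0 <;>
        · simp [hp]; omega
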